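-- pv_equiv track=rewrite | github.com/Abrechen2/sublarr | backend/routes/system/logs.py | _classify_ip
-- ===== SOURCE A (Python) =====
-- import ipaddress as _ipaddress
--
-- _RFC1918_NETWORKS = [
--     _ipaddress.ip_network("10.0.0.0/8"),
--     _ipaddress.ip_network("172.16.0.0/12"),
--     _ipaddress.ip_network("192.168.0.0/16"),
-- ]
--
-- def _classify_ip(ip: str) -> str:
--     """Classify and anonymize a single IPv4 address string."""
--     try:
--         addr = _ipaddress.IPv4Address(ip)
--     except ValueError:
--         return ip
--     if addr.is_loopback:
--         return ip
--     for network in _RFC1918_NETWORKS: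
--         if addr in network:
--             parts = ip.split(".")
--             return f"{parts[0]}.{parts[1]}.xxx.xxx"
--     return "xxx.xxx.xxx.xxx"
-- ===== SOURCE B (Python) =====
-- import re
--
-- # Standard strict dotted-quad pattern: each octet is 0-255 with no leading zeros.
-- _OCTET = r"(25[0-5]|2[0-4][0-9]|1[0-9][0-9]|[1-9][0-9]|[0-9])"
-- _IPV4_RE = re.compile(r"\.".join([_OCTET] * 4))
--
-- def _classify_ip(ip: str) -> str:
--     """Classify and anonymize a single IPv4 address string."""
--     m = _IPV4_RE.fullmatch(ip)
--     if m is None: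
--         return ip
--     first, second = int(m.group(1)), int(m.group(2))
--     if first == 127:
--         return ip
--     if first == 10 or (first == 172 and 16 <= second <= 31) or (first == 192 and second == 168):
--         return f"{m.group(1)}.{m.group(2)}.xxx.xxx"
--     return "xxx.xxx.xxx.xxx"
-- ===== Notes on version B (the rewrite author's own statement) =====
-- stated objective: simpler
-- what changed: Validation is a single strict dotted-quad regex fullmatch (octet = 25[0-5]|2[0-4][0-9]|1[0-9][0-9]|[1-9][0-9]|[0-9]) instead of the ipaddress module, and the precomputed RFC1918 ip_network table with its per-network membership loop (addr & netmask == network_address) is replaced by closed-form integer checks on the first two octets (127.x loopback; 10.x, 172.16-31.x, 192.168.x private).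
import Mathlib
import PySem

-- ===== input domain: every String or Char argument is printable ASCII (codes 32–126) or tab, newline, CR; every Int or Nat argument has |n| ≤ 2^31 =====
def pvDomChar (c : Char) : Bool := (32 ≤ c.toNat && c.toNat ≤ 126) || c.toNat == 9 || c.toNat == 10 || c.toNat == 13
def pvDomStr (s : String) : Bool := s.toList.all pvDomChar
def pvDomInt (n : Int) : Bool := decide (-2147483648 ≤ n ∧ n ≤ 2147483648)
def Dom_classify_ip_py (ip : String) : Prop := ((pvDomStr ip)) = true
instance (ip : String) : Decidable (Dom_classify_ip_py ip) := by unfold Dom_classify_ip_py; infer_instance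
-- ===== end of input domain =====

-- B validates with a single strict dotted-quad regex (re.fullmatch) instead of the
-- ipaddress module, and replaces A's precomputed ip_network table and membership loop
-- by closed-form checks on the first two octets (simpler).

-- shared scalar helpers: ASCII digit test and decimal value of a digit string
-- (used by both ports' models of IPv4Address / int())
def pvDigits (cs : List Char) : Bool := cs.all (fun c => 48 ≤ c.toNat && c.toNat ≤ 57)

def pvOctetVal (cs : List Char) : Int := cs.foldl (fun a c => a * 10 + ((c.toNat : Int) - 48)) 0

-- ===== PORT A =====
-- ipaddress.IPv4Address(ip) as A uses it: the address as its 32-bit integer, or none on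
-- ValueError (exact model: 4 dot-separated octets, 1-3 ASCII digits, no leading zero, ≤ 255)
def pvOctetA? (cs : List Char) : Option Int :=
  if 1 ≤ cs.length ∧ cs.length ≤ 3 ∧ pvDigits cs = true ∧ (cs.length = 1 ∨ cs.head? ≠ some '0')
      ∧ pvOctetVal cs ≤ 255 then
    some (pvOctetVal cs)
  else none

def pvIPv4Int? (ip : String) : Option Int :=
  match PySem.Chars.splitOn ip.toList ['.'] with
  | [a, b, c, d] =>
    match pvOctetA? a, pvOctetA? b, pvOctetA? c, pvOctetA? d with
    | some x, some y, some z, some w => some (x * 16777216 + y * 65536 + z * 256 + w)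
    | _, _, _, _ => none
  | _ => none

-- f"{parts[0]}.{parts[1]}.xxx.xxx" with parts = ip.split(".")  (only reached on a valid
-- address, where parts has 4 elements; getD's default is unreachable there)
def pvAnonA (ip : String) : String :=
  let parts := PySem.Chars.splitOn ip.toList ['.']
  String.ofList ((parts.getD 0 []) ++ '.' :: (parts.getD 1 []) ++ ".xxx.xxx".toList)

-- _RFC1918_NETWORKS as (network_address, netmask) integer pairs; `addr in network` is
-- CPython's  addr & netmask == network_address
def pvNetworks : List (Int × Int) :=
  [(167772160, 4278190080), (2886729728, 4293918720), (3232235520, 4294901760)]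

def pvLoopA (ip : String) (v : Int) : List (Int × Int) → String
  | [] => "xxx.xxx.xxx.xxx"
  | nw :: rest => if PySem.Int.band v nw.2 == nw.1 then pvAnonA ip else pvLoopA ip v rest

def classify_ip_py (ip : String) : String :=
  match pvIPv4Int? ip with
  | none => ip
  | some v =>
    -- addr.is_loopback: addr in 127.0.0.0/8
    if PySem.Int.band v 4278190080 == 2130706432 then ip
    else pvLoopA ip v pvNetworks

-- ===== PORT B =====
-- B validates with _IPV4_RE.fullmatch: four octets joined by r"\.", each octet the
-- alternation  25[0-5] | 2[0-4][0-9] | 1[0-9][0-9] | [1-9][0-9] | [0-9].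
def pvDigit (c : Char) : Bool := 48 ≤ c.toNat && c.toNat ≤ 57

-- the octet alternation, one case per alternative (grouped by length; exact: the
-- alternatives of each length are disjoint from the other lengths)
def pvOctetMatch : List Char → Bool
  | [a] => pvDigit a                                                   -- [0-9]
  | [a, b] => (49 ≤ a.toNat && a.toNat ≤ 57) && pvDigit b              -- [1-9][0-9]
  | [a, b, c] =>
      (a == '2' && b == '5' && (48 ≤ c.toNat && c.toNat ≤ 53))         -- 25[0-5]
        || (a == '2' && (48 ≤ b.toNat && b.toNat ≤ 52) && pvDigit c)   -- 2[0-4][0-9]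
        || (a == '1' && pvDigit b && pvDigit c)                        -- 1[0-9][0-9]
  | _ => false

-- fullmatch of octet(\.octet){3}: since no octet contains '.', it succeeds exactly when
-- the '.'-split has 4 parts each matching the octet alternation (exact model of re here)
def pvIsIPv4 (ip : String) : Bool :=
  let parts := PySem.Chars.splitOn ip.toList ['.']
  parts.length == 4 && parts.all pvOctetMatch

def classify_ip_py_alt (ip : String) : String :=
  if pvIsIPv4 ip then
    let parts := PySem.Chars.splitOn ip.toList ['.']
    -- int(m.group(1)), int(m.group(2)): the first two matched octets
    let first := pvOctetVal (parts.getD 0 [])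
    let second := pvOctetVal (parts.getD 1 [])
    if first == 127 then ip
    else if first == 10 || (first == 172 && decide (16 ≤ second) && decide (second ≤ 31))
        || (first == 192 && second == 168) then
      String.ofList ((parts.getD 0 []) ++ '.' :: (parts.getD 1 []) ++ ".xxx.xxx".toList)
    else "xxx.xxx.xxx.xxx"
  else ip

-- ===== PRECONDITION & SPEC =====
def Spec_classify_ip_py (ip : String) (out : String) : Prop := out = classify_ip_py_alt ip
instance (ip : String) (out : String) : Decidable (Spec_classify_ip_py ip out) := by unfold Spec_classify_ip_py; infer_instance

-- ===== CLAIM (what is proved, stated in full; the proofs are below) =====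
def Claim_equal_classify_ip_py : Prop := ∀ (ip : String), Dom_classify_ip_py ip → Spec_classify_ip_py ip (classify_ip_py ip)

-- ===== LEMMAS AND PROOFS =====

theorem pvCharEq (a b : Char) : a = b ↔ a.toNat = b.toNat :=
  ⟨fun h => h ▸ rfl, fun h => Char.ext (UInt32.toNat_inj.mp h)⟩

theorem pvOctetMatch_iff (cs : List Char) :
    pvOctetMatch cs = true ↔ (1 ≤ cs.length ∧ cs.length ≤ 3 ∧ pvDigits cs = true
      ∧ (cs.length = 1 ∨ cs.head? ≠ some '0') ∧ pvOctetVal cs ≤ 255) := by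
  rcases cs with _ | ⟨a, _ | ⟨b, _ | ⟨c, _ | ⟨d, rest⟩⟩⟩⟩ <;>
    simp only [pvOctetMatch, pvDigit, pvDigits, pvOctetVal, List.all_cons, List.all_nil,
      List.foldl, List.length, List.head?,
      Bool.and_eq_true, Bool.or_eq_true, decide_eq_true_eq, beq_iff_eq, Bool.and_true,
      true_and, ne_eq, Option.some.injEq, reduceCtorEq, pvCharEq,
      show ('0' : Char).toNat = 48 from rfl, show ('1' : Char).toNat = 49 from rfl,
      show ('2' : Char).toNat = 50 from rfl, show ('5' : Char).toNat = 53 from rfl,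
      Bool.false_eq_true, false_iff, not_and, true_or] <;>
    omega

theorem pvOctetA?_eq (cs : List Char) :
    pvOctetA? cs = if pvOctetMatch cs then some (pvOctetVal cs) else none := by
  unfold pvOctetA?
  by_cases hp : (1 ≤ cs.length ∧ cs.length ≤ 3 ∧ pvDigits cs = true
      ∧ (cs.length = 1 ∨ cs.head? ≠ some '0') ∧ pvOctetVal cs ≤ 255)
  · rw [if_pos hp, if_pos ((pvOctetMatch_iff cs).mpr hp)]
  · rw [if_neg hp, if_neg (fun hh => hp ((pvOctetMatch_iff cs).mp hh))]

theorem pvOctetVal_foldl_nonneg (cs : List Char) (acc : Int) (hd : pvDigits cs = true)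
    (ha : 0 ≤ acc) :
    0 ≤ cs.foldl (fun a c => a * 10 + ((c.toNat : Int) - 48)) acc := by
  induction cs generalizing acc with
  | nil => simpa using ha
  | cons c cs ih =>
    simp only [pvDigits, List.all_cons, Bool.and_eq_true, decide_eq_true_eq] at hd
    obtain ⟨⟨hcl, hcu⟩, htl⟩ := hd
    simp only [List.foldl_cons]
    refine ih _ htl ?_
    have hc48 : (48 : Int) ≤ (c.toNat : Int) := by exact_mod_cast hcl
    omega

theorem pvOctetMatch_bound (cs : List Char) (h : pvOctetMatch cs = true) :
    0 ≤ pvOctetVal cs ∧ pvOctetVal cs ≤ 255 := by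
  obtain ⟨-, -, hdig, -, hle⟩ := (pvOctetMatch_iff cs).mp h
  exact ⟨pvOctetVal_foldl_nonneg cs 0 hdig le_rfl, hle⟩

theorem pv_land_split (k hi low M : Nat) (h : low < 2 ^ k) :
    (hi * 2 ^ k + low) &&& (M * 2 ^ k) = (hi &&& M) * 2 ^ k := by
  apply Nat.eq_of_testBit_eq
  intro j
  rw [Nat.testBit_land, Nat.testBit_mul_two_pow, Nat.testBit_mul_two_pow,
    show hi * 2 ^ k + low = 2 ^ k * hi + low by ring, Nat.testBit_two_pow_mul_add hi h,
    Nat.testBit_land]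
  by_cases hj : j < k
  · simp [hj, Nat.not_le.mpr hj]
  · simp [hj, Nat.le_of_not_lt hj]

theorem pv_and255 (a : Nat) (ha : a < 256) : a &&& 255 = a := by
  have h := Nat.and_two_pow_sub_one_eq_mod a 8
  norm_num at h
  rw [h, Nat.mod_eq_of_lt ha]

theorem pv_and65535 (h : Nat) (hh : h < 65536) : h &&& 65535 = h := by
  have h2 := Nat.and_two_pow_sub_one_eq_mod h 16
  norm_num at h2
  rw [h2, Nat.mod_eq_of_lt hh]

theorem pv_and65520 (h : Nat) (hh : h < 65536) : h &&& 65520 = h / 16 * 16 := by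
  conv_lhs => rw [show h = h / 16 * 2 ^ 4 + h % 16 by omega,
    show (65520 : Nat) = 4095 * 2 ^ 4 by norm_num]
  rw [pv_land_split 4 _ _ 4095 (by omega)]
  have h2 := Nat.and_two_pow_sub_one_eq_mod (h / 16) 12
  norm_num at h2
  rw [h2, Nat.mod_eq_of_lt (by omega)]
  norm_num

theorem pv_maskA (a b c d : Nat) (ha : a < 256) (hb : b < 256) (hc : c < 256) (hd : d < 256) :
    (a * 16777216 + b * 65536 + c * 256 + d) &&& 4278190080 = a * 16777216 := by
  have h1 : a * 16777216 + b * 65536 + c * 256 + d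
      = a * 2 ^ 24 + (b * 65536 + c * 256 + d) := by ring
  rw [h1, show (4278190080 : Nat) = 255 * 2 ^ 24 by norm_num,
    pv_land_split 24 _ _ 255 (by omega), pv_and255 a ha]
  norm_num

theorem pv_mask172 (a b c d : Nat) (ha : a < 256) (hb : b < 256) (hc : c < 256) (hd : d < 256) :
    (a * 16777216 + b * 65536 + c * 256 + d) &&& 4293918720
      = ((a * 256 + b) / 16) * 16 * 65536 := by
  have h1 : a * 16777216 + b * 65536 + c * 256 + d
      = (a * 256 + b) * 2 ^ 16 + (c * 256 + d) := by ring
  rw [h1, show (4293918720 : Nat) = 65520 * 2 ^ 16 by norm_num,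
    pv_land_split 16 _ _ 65520 (by omega), pv_and65520 (a * 256 + b) (by omega)]
  norm_num

theorem pv_mask192 (a b c d : Nat) (ha : a < 256) (hb : b < 256) (hc : c < 256) (hd : d < 256) :
    (a * 16777216 + b * 65536 + c * 256 + d) &&& 4294901760 = (a * 256 + b) * 65536 := by
  have h1 : a * 16777216 + b * 65536 + c * 256 + d
      = (a * 256 + b) * 2 ^ 16 + (c * 256 + d) := by ring
  rw [h1, show (4294901760 : Nat) = 65535 * 2 ^ 16 by norm_num,
    pv_land_split 16 _ _ 65535 (by omega), pv_and65535 (a * 256 + b) (by omega)]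
  norm_num

theorem pv_bandA (a b c d : Nat) (ha : a < 256) (hb : b < 256) (hc : c < 256) (hd : d < 256) :
    PySem.Int.band ((a : Int) * 16777216 + (b : Int) * 65536 + (c : Int) * 256 + (d : Int))
      4278190080 = ((a * 16777216 : Nat) : Int) := by
  have h1 : (a : Int) * 16777216 + (b : Int) * 65536 + (c : Int) * 256 + (d : Int)
      = ((a * 16777216 + b * 65536 + c * 256 + d : Nat) : Int) := by push_cast; ring
  have h2 : (4278190080 : Int) = ((4278190080 : Nat) : Int) := by norm_num
  rw [h1, h2, PySem.Int.band_natCast, pv_maskA a b c d ha hb hc hd]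

theorem pv_band172 (a b c d : Nat) (ha : a < 256) (hb : b < 256) (hc : c < 256) (hd : d < 256) :
    PySem.Int.band ((a : Int) * 16777216 + (b : Int) * 65536 + (c : Int) * 256 + (d : Int))
      4293918720 = ((((a * 256 + b) / 16) * 16 * 65536 : Nat) : Int) := by
  have h1 : (a : Int) * 16777216 + (b : Int) * 65536 + (c : Int) * 256 + (d : Int)
      = ((a * 16777216 + b * 65536 + c * 256 + d : Nat) : Int) := by push_cast; ring
  have h2 : (4293918720 : Int) = ((4293918720 : Nat) : Int) := by norm_num
  rw [h1, h2, PySem.Int.band_natCast, pv_mask172 a b c d ha hb hc hd]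

theorem pv_band192 (a b c d : Nat) (ha : a < 256) (hb : b < 256) (hc : c < 256) (hd : d < 256) :
    PySem.Int.band ((a : Int) * 16777216 + (b : Int) * 65536 + (c : Int) * 256 + (d : Int))
      4294901760 = (((a * 256 + b) * 65536 : Nat) : Int) := by
  have h1 : (a : Int) * 16777216 + (b : Int) * 65536 + (c : Int) * 256 + (d : Int)
      = ((a * 16777216 + b * 65536 + c * 256 + d : Nat) : Int) := by push_cast; ring
  have h2 : (4294901760 : Int) = ((4294901760 : Nat) : Int) := by norm_num
  rw [h1, h2, PySem.Int.band_natCast, pv_mask192 a b c d ha hb hc hd]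

-- ===== VERDICT (by name: the statement is the Claim_ definition above) =====
set_option maxHeartbeats 1000000 in
theorem classify_ip_py_spec : Claim_equal_classify_ip_py := by
  intro ip _
  unfold Spec_classify_ip_py
  unfold classify_ip_py classify_ip_py_alt pvIPv4Int? pvIsIPv4
  rcases hsp : PySem.Chars.splitOn ip.toList ['.'] with _ | ⟨a, _ | ⟨b, _ | ⟨c, _ | ⟨d, _ | ⟨e, rest⟩⟩⟩⟩⟩ <;>
    simp only [pvOctetA?_eq, List.length, List.all_cons, List.all_nil]
  · simp
  · simp
  · simp
  · simp
  case cons.cons.cons.cons.nil =>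
    by_cases h1 : pvOctetMatch a <;> by_cases h2 : pvOctetMatch b <;>
      by_cases h3 : pvOctetMatch c <;> by_cases h4 : pvOctetMatch d <;>
      simp only [h1, h2, h3, h4, if_true, Bool.and_true, Bool.and_false] <;>
      try simp
    -- all four octets valid
    obtain ⟨h1a, h1b⟩ := pvOctetMatch_bound a h1
    obtain ⟨h2a, h2b⟩ := pvOctetMatch_bound b h2
    obtain ⟨h3a, h3b⟩ := pvOctetMatch_bound c h3
    obtain ⟨h4a, h4b⟩ := pvOctetMatch_bound d h4
    obtain ⟨x, hx⟩ : ∃ x : Nat, pvOctetVal a = (x : Int) := ⟨(pvOctetVal a).toNat, (Int.toNat_of_nonneg h1a).symm⟩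
    obtain ⟨y, hy⟩ : ∃ y : Nat, pvOctetVal b = (y : Int) := ⟨(pvOctetVal b).toNat, (Int.toNat_of_nonneg h2a).symm⟩
    obtain ⟨z, hz⟩ : ∃ z : Nat, pvOctetVal c = (z : Int) := ⟨(pvOctetVal c).toNat, (Int.toNat_of_nonneg h3a).symm⟩
    obtain ⟨w, hw⟩ : ∃ w : Nat, pvOctetVal d = (w : Int) := ⟨(pvOctetVal d).toNat, (Int.toNat_of_nonneg h4a).symm⟩
    have hxb : x < 256 := by omega
    have hyb : y < 256 := by omega
    have hzb : z < 256 := by omega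
    have hwb : w < 256 := by omega
    simp only [hx, hy, hz, hw, pvLoopA, pvNetworks,
      pv_bandA x y z w hxb hyb hzb hwb, pv_band172 x y z w hxb hyb hzb hwb,
      pv_band192 x y z w hxb hyb hzb hwb, pvAnonA, hsp, beq_iff_eq]
    split_ifs <;> first | rfl | (exfalso; push_cast at *; omega) | (simp [List.getD, ← String.ofList_append])
  case cons.cons.cons.cons.cons =>
    simp
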